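-- pv_equiv track=rewrite | github.com/RithwikYaramaneni/119--Myszkowiski-Cypher | Cia.py | myszkowski_encrypt
-- ===== SOURCE A (Python) =====
-- def get_column_order(key):
--     """
--     Assign a rank to each column based on alphabetical order of key chars.
--     Duplicate letters share the same rank and are read together row-by-row.
--     """
--     sorted_chars = sorted(enumerate(key), key=lambda x: x[1])
--     rank = 0
--     order = [0] * len(key)
--     i = 0
--     while i < len(sorted_chars):
--         j = i
--         while j < len(sorted_chars) and sorted_chars[j][1] == sorted_chars[i][1]:
--             j += 1
--         for k in range(i, j):
--             order[sorted_chars[k][0]] = rank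
--         rank += 1
--         i = j
--     return order
--
-- def myszkowski_encrypt(text, key):
--     num_cols = len(key)
--     remainder = len(text) % num_cols
--     if remainder != 0:
--         text += 'X' * (num_cols - remainder)
--
--     num_rows = len(text) // num_cols
--     grid = [list(text[r * num_cols:(r + 1) * num_cols]) for r in range(num_rows)]
--
--     col_order = get_column_order(key)
--     num_ranks = max(col_order) + 1
--     ciphertext = ""
--
--     for rank in range(num_ranks):
--         cols_with_rank = [c for c, r in enumerate(col_order) if r == rank]
--         for r in range(num_rows):
--             for c in cols_with_rank:
--                 ciphertext += grid[r][c]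
--
--     return ciphertext
-- ===== SOURCE B (Python) =====
-- def myszkowski_encrypt(text, key):
--     k = len(key)
--     rem = len(text) % k
--     if rem:
--         text += 'X' * (k - rem)
--     # Stable sort of all character positions by the key letter of their column:
--     # within equal letters positions keep row-major order, which is exactly the
--     # Myszkowski read-out (ranks ascending, rows within a rank, columns within a row).
--     return ''.join(text[i] for i in sorted(range(len(text)), key=lambda i: key[i % k]))
-- ===== Notes on version B (the rewrite author's own statement) =====
-- stated objective: simpler
-- what changed: Drops ranks, grouping and the row grid entirely: B pads the text and emits it as one stable sort of all character positions keyed by the key letter of each position's column, which reproduces the Myszkowski read-out because ranks ascend with key letters and ties keep row-major order.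
import Mathlib
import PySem

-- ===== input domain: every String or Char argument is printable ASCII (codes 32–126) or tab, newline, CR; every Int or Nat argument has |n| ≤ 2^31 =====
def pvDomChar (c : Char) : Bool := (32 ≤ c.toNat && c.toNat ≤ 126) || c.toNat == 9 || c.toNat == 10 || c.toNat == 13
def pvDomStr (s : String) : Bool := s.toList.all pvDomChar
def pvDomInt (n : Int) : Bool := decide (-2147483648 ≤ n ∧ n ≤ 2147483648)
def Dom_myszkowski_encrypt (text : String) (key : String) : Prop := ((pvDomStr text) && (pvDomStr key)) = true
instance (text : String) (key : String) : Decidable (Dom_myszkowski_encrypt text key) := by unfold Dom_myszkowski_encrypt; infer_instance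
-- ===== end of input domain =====

-- B replaces A's rank computation, per-rank column scans and row grid by ONE stable sort of
-- all character positions, keyed by the key letter of each position's column.

-- ===== PORT A =====
-- the two nested while loops of get_column_order: each outer iteration consumes one run
-- of equal key characters from sorted_chars and writes `rank` at their original indices
def gcoLoop (sc : List (Int × Char)) (order : List Int) (rank : Int) : List Int :=
  match sc with
  | [] => order
  | p :: rest =>
    let run := p :: rest.takeWhile (fun q => q.2 == p.2)
    let rest' := rest.dropWhile (fun q => q.2 == p.2)
    gcoLoop rest' (run.foldl (fun o q => o.set q.1.toNat rank) order) (rank + 1)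
termination_by sc.length
decreasing_by exact Nat.lt_succ_of_le (List.length_dropWhile_le _ _)

def get_column_order (key : List Char) : List Int :=
  let sorted_chars := PySem.List.sorted (PySem.List.enumerate key) (fun x => x.2)
  gcoLoop sorted_chars (List.replicate key.length 0) 0

def myszkowski_encrypt (text : String) (key : String) : String :=
  let kl := key.toList
  let num_cols := kl.length
  let tl0 := text.toList
  let remainder := tl0.length % num_cols      -- Python raises ZeroDivisionError for key = "": excluded by Pre_
  let tl := if remainder ≠ 0 then tl0 ++ List.replicate (num_cols - remainder) 'X' else tl0
  let num_rows := tl.length / num_cols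
  let grid := (List.range num_rows).map
    (fun r : Nat => PySem.List.slice tl (some ((r : Int) * num_cols)) (some (((r : Int) + 1) * num_cols)))
  let col_order := get_column_order kl
  -- max(col_order) raises only on an empty key, which Pre_ excludes; getD 0 is unreachable
  let num_ranks := ((PySem.List.max? col_order (fun x => x)).getD 0) + 1
  String.mk <|
    (PySem.List.pyRange 0 num_ranks).foldl (fun cipher rank =>
      let cols_with_rank := ((PySem.List.enumerate col_order).filter (fun p => p.2 == rank)).map (fun p => p.1)
      (List.range num_rows).foldl (fun cipher r =>
        cols_with_rank.foldl (fun cipher c =>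
          -- grid[r][c]: always in range here, .getD default is unreachable
          cipher ++ [(PySem.List.pyGet? (grid.getD r []) c).getD 'X']) cipher) cipher) []

-- ===== PORT B =====
def myszkowski_encrypt_alt (text : String) (key : String) : String :=
  let kl := key.toList
  let k := kl.length
  let rem := text.toList.length % k           -- ZeroDivisionError for key = "": excluded by Pre_
  let tl := if rem ≠ 0 then text.toList ++ List.replicate (k - rem) 'X' else text.toList
  -- ''.join(text[i] for i in sorted(range(len(text)), key=lambda i: key[i % k]))
  String.mk <|
    (PySem.List.sorted (PySem.List.pyRange 0 tl.length)
        -- key[i % k]: the index is always in range, the .getD default is unreachable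
        (fun i => (PySem.List.pyGet? kl (PySem.Int.mod i k)).getD 'X')).map
      (fun i => (PySem.List.pyGet? tl i).getD 'X')

-- ===== PRECONDITION & SPEC =====
-- Pre_ excludes only key = "", on which A raises ZeroDivisionError (len(text) % 0).
def Pre_myszkowski_encrypt (text : String) (key : String) : Prop := key ≠ ""
instance (text : String) (key : String) : Decidable (Pre_myszkowski_encrypt text key) := by
  unfold Pre_myszkowski_encrypt; infer_instance

def pvWitness_myszkowski_encrypt : String × String := ("HELLO", "bab")

def Spec_myszkowski_encrypt (text : String) (key : String) (out : String) : Prop := out = myszkowski_encrypt_alt text key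
instance (text : String) (key : String) (out : String) : Decidable (Spec_myszkowski_encrypt text key out) := by unfold Spec_myszkowski_encrypt; infer_instance

-- ===== CLAIM (what is proved, stated in full; the proofs are below) =====
def Claim_equal_myszkowski_encrypt : Prop := ∀ (text : String) (key : String), Dom_myszkowski_encrypt text key → Pre_myszkowski_encrypt text key → Spec_myszkowski_encrypt text key (myszkowski_encrypt text key)

-- ===== LEMMAS AND PROOFS =====

-- the sorted list of the distinct key characters
def dOf (kl : List Char) : List Char :=
  PySem.List.sorted (PySem.Set.ofList kl) (fun x => x)

def scOf (kl : List Char) : List (Int × Char) :=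
  PySem.List.sorted (PySem.List.enumerate kl) (fun x => x.2)

-- ---- small list facts ----

lemma foldl_set_length (run : List (Int × Char)) (o : List Int) (v : Int) :
    (run.foldl (fun o q => o.set q.1.toNat v) o).length = o.length := by
  induction run generalizing o with
  | nil => rfl
  | cons q run ih => simp [List.foldl_cons, ih]

lemma foldl_set_getElem? (run : List (Int × Char)) (o : List Int) (v : Int) (c : Nat) :
    (run.foldl (fun o q => o.set q.1.toNat v) o)[c]? =
      if c ∈ run.map (fun q => q.1.toNat) then (if c < o.length then some v else none)
      else o[c]? := by
  induction run generalizing o with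
  | nil => simp
  | cons q run ih =>
    simp only [List.foldl_cons, ih, List.length_set, List.map_cons, List.mem_cons]
    by_cases h1 : c ∈ run.map (fun q => q.1.toNat)
    · simp [h1]
    · by_cases h2 : c = q.1.toNat
      · subst h2
        simp [h1, List.getElem?_set]
      · simp [h1, h2, Ne.symm h2]

lemma foldl_add_append {α : Type} [BEq α] [LawfulBEq α] (post : List α) (a s : List α)
    (h : ∀ x ∈ post, x ∉ a) :
    post.foldl PySem.Set.add (a ++ s) = a ++ post.foldl PySem.Set.add s := by
  induction post generalizing s with
  | nil => rfl
  | cons x post ih =>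
    have hx : x ∉ a := h x (by simp)
    have : PySem.Set.add (a ++ s) x = a ++ PySem.Set.add s x := by
      simp only [PySem.Set.add, PySem.Set.contains, List.contains_append]
      have : a.contains x = false := by simpa using hx
      rw [this]
      split_ifs <;> simp_all [List.append_assoc]
    rw [List.foldl_cons, this, List.foldl_cons, ih _ (fun y hy => h y (by simp [hy]))]

lemma foldl_add_const {α : Type} [BEq α] [LawfulBEq α] (pre : List α) (ch : α)
    (hpre : ∀ x ∈ pre, x = ch) :
    pre.foldl PySem.Set.add [ch] = [ch] := by
  induction pre with
  | nil => rfl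
  | cons x pre ih =>
    have hx : x = ch := hpre x (by simp)
    subst hx
    simp only [List.foldl_cons, PySem.Set.add, PySem.Set.contains]
    simp [ih (fun y hy => hpre y (by simp [hy]))]

lemma ofList_run {α : Type} [BEq α] [LawfulBEq α] (ch : α) (pre post : List α)
    (hpre : ∀ x ∈ pre, x = ch) (hpost : ch ∉ post) :
    PySem.Set.ofList (ch :: (pre ++ post)) = ch :: PySem.Set.ofList post := by
  have h1 : PySem.Set.add (PySem.Set.empty) ch = [ch] := rfl
  simp only [PySem.Set.ofList, List.foldl_cons, h1, List.foldl_append]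
  rw [foldl_add_const pre ch hpre]
  have := foldl_add_append post [ch] [] (fun x hx => by
    simp only [List.mem_singleton]
    exact fun he => hpost (he ▸ hx))
  simpa [PySem.Set.empty] using this

lemma ofList_sublist {α : Type} [BEq α] [LawfulBEq α] (xs : List α) :
    List.Sublist (PySem.Set.ofList xs) xs := by
  suffices h : ∀ (acc : List α), ∃ t, xs.foldl PySem.Set.add acc = acc ++ t ∧ List.Sublist t xs by
    obtain ⟨t, ht, hs⟩ := h []
    simpa [PySem.Set.ofList, PySem.Set.empty, ht] using hs
  induction xs with
  | nil => exact fun acc => ⟨[], by simp⟩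
  | cons x xs ih =>
    intro acc
    rw [List.foldl_cons]
    by_cases hc : x ∈ acc
    · obtain ⟨t, ht, hs⟩ := ih acc
      have : PySem.Set.add acc x = acc := by simp [PySem.Set.add, PySem.Set.contains, hc]
      exact ⟨t, by rw [this, ht], hs.cons x⟩
    · obtain ⟨t, ht, hs⟩ := ih (acc ++ [x])
      have : PySem.Set.add acc x = acc ++ [x] := by
        simp [PySem.Set.add, PySem.Set.contains, hc]
      exact ⟨x :: t, by rw [this, ht, List.append_assoc]; rfl, hs.cons₂ x⟩

-- ---- the rank loop of A ----

lemma gcoLoop_spec (sc : List (Int × Char)) (order : List Int) (rank : Int)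
    (hs : sc.Pairwise (fun a b => a.2 ≤ b.2))
    (hn : (sc.map (fun p => p.1.toNat)).Nodup) :
    (gcoLoop sc order rank).length = order.length ∧
    (∀ p ∈ sc, (gcoLoop sc order rank)[p.1.toNat]? =
        if p.1.toNat < order.length
        then some (rank + ((PySem.Set.ofList (sc.map (fun q => q.2))).idxOf p.2 : Nat))
        else none) ∧
    (∀ c : Nat, c ∉ sc.map (fun p => p.1.toNat) → (gcoLoop sc order rank)[c]? = order[c]?) := by
  induction sc, order, rank using gcoLoop.induct with
  | case1 order rank => simp [gcoLoop]
  | case2 order rank p rest hrunlet hrestlet ih =>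
    set tw := rest.takeWhile (fun q => q.2 == p.2) with htw
    set dw := rest.dropWhile (fun q => q.2 == p.2) with hdw
    have hrest : tw ++ dw = rest := List.takeWhile_append_dropWhile
    have hrun2 : ∀ q ∈ p :: tw, q.2 = p.2 := by
      intro q hq
      rcases List.mem_cons.mp hq with h | h
      · rw [h]
      · exact eq_of_beq (List.mem_takeWhile_imp (p := fun q : Int × Char => q.2 == p.2) h)
    have hle : ∀ q ∈ rest, p.2 ≤ q.2 := (List.pairwise_cons.mp hs).1
    have hdwp : dw.Pairwise (fun a b => a.2 ≤ b.2) :=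
      ((List.pairwise_cons.mp hs).2).sublist (List.dropWhile_sublist _)
    have hlt : ∀ q ∈ dw, p.2 < q.2 := by
      cases hq' : rest.dropWhile (fun q => q.2 == p.2) with
      | nil => intro q hq; rw [hdw, hq'] at hq; simp at hq
      | cons h0 t =>
        have hwne : rest.dropWhile (fun q : Int × Char => q.2 == p.2) ≠ [] := by simp [hq']
        have hne := List.head_dropWhile_not (fun q : Int × Char => q.2 == p.2) hwne
        have hheq : (rest.dropWhile (fun q : Int × Char => q.2 == p.2)).head hwne = h0 := by
          simp [hq']
        rw [hheq] at hne
        have hh0 : h0.2 ≠ p.2 := by simpa using hne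
        have hh0mem : h0 ∈ rest :=
          (List.dropWhile_sublist _).mem (by rw [hq']; simp)
        have hph0 : p.2 < h0.2 := lt_of_le_of_ne (hle h0 hh0mem) (Ne.symm hh0)
        intro q hq
        rw [hdw, hq'] at hq
        rcases List.mem_cons.mp hq with h | h
        · rw [h]; exact hph0
        · have hdwp' := hdwp
          rw [hdw, hq'] at hdwp'
          exact lt_of_lt_of_le hph0 ((List.pairwise_cons.mp hdwp').1 q h)
    have hofl : PySem.Set.ofList ((p :: rest).map (fun q => q.2))
        = p.2 :: PySem.Set.ofList (dw.map (fun q => q.2)) := by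
      have : (p :: rest).map (fun q : Int × Char => q.2)
          = p.2 :: (tw.map (fun q => q.2) ++ dw.map (fun q => q.2)) := by
        rw [← hrest]; simp
      rw [this]
      exact ofList_run _ _ _
        (by intro x hx; obtain ⟨q, hq, hqe⟩ := List.mem_map.mp hx
            exact hqe ▸ hrun2 q (by simp [hq]))
        (by intro hx; obtain ⟨q, hq, hqe⟩ := List.mem_map.mp hx
            exact absurd (hqe ▸ hlt q hq) (lt_irrefl _))
    have hmapsplit : (p :: rest).map (fun q => q.1.toNat)
        = (p :: tw).map (fun q => q.1.toNat) ++ dw.map (fun q => q.1.toNat) := by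
      rw [← hrest]; simp
    rw [hmapsplit] at hn
    have hnodup := List.nodup_append.mp hn
    have hdisj : ∀ a ∈ (p :: tw).map (fun q : Int × Char => q.1.toNat),
        a ∉ dw.map (fun q : Int × Char => q.1.toNat) := by
      intro a ha hb
      exact (hnodup.2.2 a ha a hb) rfl
    have hdwn : (dw.map (fun p => p.1.toNat)).Nodup := hnodup.2.1
    obtain ⟨ihlen, ihmem, ihout⟩ := ih hdwp hdwn
    set order' := ((p :: tw).foldl (fun o q => o.set q.1.toNat rank) order) with horder'
    have hlen' : order'.length = order.length := foldl_set_length _ _ _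
    have hgco : gcoLoop (p :: rest) order rank = gcoLoop dw order' (rank + 1) := by
      rw [gcoLoop]
    refine ⟨?_, ?_, ?_⟩
    · rw [hgco, ihlen, hlen']
    · intro q hq
      rw [hgco, hofl]
      have hsplit : q = p ∨ q ∈ tw ∨ q ∈ dw := by
        rcases List.mem_cons.mp hq with h | h
        · exact Or.inl h
        · rw [← hrest] at h
          rcases List.mem_append.mp h with h | h
          · exact Or.inr (Or.inl h)
          · exact Or.inr (Or.inr h)
      rcases hsplit with h | h | h
      · have hqrun : q ∈ p :: tw := by simp [h]
        have hnin : q.1.toNat ∉ dw.map (fun q : Int × Char => q.1.toNat) :=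
          hdisj _ (List.mem_map_of_mem hqrun)
        rw [ihout _ hnin, horder', foldl_set_getElem?]
        rw [if_pos (List.mem_map_of_mem hqrun)]
        have : q.2 = p.2 := hrun2 q hqrun
        rw [this, List.idxOf_cons_self]
        simp
      · have hqrun : q ∈ p :: tw := by simp [h]
        have hnin : q.1.toNat ∉ dw.map (fun q : Int × Char => q.1.toNat) :=
          hdisj _ (List.mem_map_of_mem hqrun)
        rw [ihout _ hnin, horder', foldl_set_getElem?]
        rw [if_pos (List.mem_map_of_mem hqrun)]
        have : q.2 = p.2 := hrun2 q hqrun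
        rw [this, List.idxOf_cons_self]
        simp
      · have := ihmem q h
        rw [hlen'] at this
        rw [this]
        have hne : q.2 ≠ p.2 := fun he => absurd (he ▸ hlt q h) (lt_irrefl _)
        rw [List.idxOf_cons_ne _ (Ne.symm hne)]
        by_cases hb : q.1.toNat < order.length
        · rw [if_pos hb, if_pos hb]
          congr 1
          push_cast
          ring
        · rw [if_neg hb, if_neg hb]
    · intro c hc
      rw [hmapsplit] at hc
      have h1 : c ∉ (p :: tw).map (fun q : Int × Char => q.1.toNat) :=
        fun h => hc (List.mem_append.mpr (Or.inl h))
      have h2 : c ∉ dw.map (fun q : Int × Char => q.1.toNat) :=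
        fun h => hc (List.mem_append.mpr (Or.inr h))
      rw [hgco, ihout _ h2, horder', foldl_set_getElem?, if_neg h1]

lemma scOf_perm (kl : List Char) : (scOf kl).Perm (PySem.List.enumerate kl) :=
  PySem.List.sorted_perm _ _ _

lemma scOf_snd_perm (kl : List Char) : ((scOf kl).map (fun q => q.2)).Perm kl := by
  have := (scOf_perm kl).map (fun q : Int × Char => q.2)
  rwa [PySem.List.map_snd_enumerate] at this

lemma E_eq_dOf (kl : List Char) :
    PySem.Set.ofList ((scOf kl).map (fun q => q.2)) = dOf kl := by
  set L := (scOf kl).map (fun q : Int × Char => q.2) with hL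
  set E := PySem.Set.ofList L with hE
  have hnd : E.Nodup := PySem.Set.nodup_ofList _
  have hmem : ∀ ch : Char, ch ∈ E ↔ ch ∈ kl := by
    intro ch
    rw [hE, PySem.Set.mem_ofList]
    exact (scOf_snd_perm kl).mem_iff
  have hple : L.Pairwise (fun a b => a ≤ b) := by
    have := PySem.List.sorted_pairwise (PySem.List.enumerate kl) (fun x : Int × Char => x.2)
    rw [hL]
    exact List.pairwise_map.mpr this
  have hplt : E.Pairwise (fun a b => a < b) := by
    have h1 : E.Pairwise (fun a b => a ≤ b) := hple.sublist (ofList_sublist L)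
    have h2 : E.Pairwise (fun a b => a ≠ b) := hnd
    exact (h1.and h2).imp (fun h => lt_of_le_of_ne h.1 h.2)
  have hperm : E.Perm (PySem.Set.ofList kl) := by
    rw [List.perm_ext_iff_of_nodup hnd (PySem.Set.nodup_ofList _)]
    intro a
    rw [hmem, PySem.Set.mem_ofList]
  exact (PySem.List.sorted_eq_of_perm_of_pairwise_lt _ _ _ hperm hplt).symm

lemma enum_map_toNat (kl : List Char) :
    (PySem.List.enumerate kl).map (fun p => p.1.toNat) = List.range kl.length := by
  have h1 : (PySem.List.enumerate kl).map (fun p => p.1.toNat)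
      = ((PySem.List.enumerate kl).map (fun p => p.1)).map (fun i => i.toNat) := by
    rw [List.map_map]; rfl
  rw [h1, PySem.List.map_fst_enumerate]
  simp only [zero_add, PySem.List.pyRange_zero_natCast, List.map_map]
  have : ((fun i : Int => i.toNat) ∘ fun k : Nat => (k : Int)) = id := by
    funext k; simp
  rw [this, List.map_id]

lemma max?_isSome {α : Type} (xs : List α) (key : α → Int) (h : xs ≠ []) :
    (PySem.List.max? xs key).isSome := by
  obtain ⟨x, xs, rfl⟩ := List.exists_cons_of_ne_nil h
  rw [PySem.List.max?]
  simp only [List.foldl_cons]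
  suffices hgen : ∀ (l : List α) (a : α),
      (l.foldl (fun acc x =>
        match acc with
        | none => some x
        | some m => if key m < key x then some x else some m) (some a)).isSome by
    exact hgen xs x
  intro l
  induction l with
  | nil => intro a; rfl
  | cons y l ih =>
    intro a
    simp only [List.foldl_cons]
    by_cases hk : key a < key y <;> simp [hk, ih]

-- A's column order is: index of the column's key character in the sorted distinct characters
lemma get_column_order_eq (kl : List Char) :
    get_column_order kl = kl.map (fun ch => ((dOf kl).idxOf ch : Int)) := by
  have hs : (scOf kl).Pairwise (fun a b => a.2 ≤ b.2) :=
    PySem.List.sorted_pairwise _ _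
  have hn : ((scOf kl).map (fun p => p.1.toNat)).Nodup := by
    have hperm := (scOf_perm kl).map (fun p : Int × Char => p.1.toNat)
    rw [enum_map_toNat] at hperm
    exact hperm.nodup_iff.mpr (List.nodup_range)
  obtain ⟨hlen, hmem, _⟩ :=
    gcoLoop_spec (scOf kl) (List.replicate kl.length 0) 0 hs hn
  have hgco : get_column_order kl = gcoLoop (scOf kl) (List.replicate kl.length 0) 0 := rfl
  rw [hgco]
  apply List.ext_getElem?
  intro i
  by_cases hi : i < kl.length
  · have hpmem : ((i : Int), kl[i]) ∈ scOf kl := by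
      rw [(scOf_perm kl).mem_iff, PySem.List.mem_enumerate_iff]
      exact ⟨i, hi, by simp⟩
    have := hmem _ hpmem
    simp only [Int.toNat_natCast] at this
    rw [this]
    rw [if_pos (by simpa using hi)]
    rw [List.getElem?_map, List.getElem?_eq_getElem hi]
    simp [E_eq_dOf]
  · rw [List.getElem?_eq_none, List.getElem?_eq_none]
    · simpa using Nat.le_of_not_lt hi
    · rw [hlen]; simpa using Nat.le_of_not_lt hi

-- ---- facts about dOf ----

lemma dOf_nodup (kl : List Char) : (dOf kl).Nodup := by
  have h := PySem.List.sorted_perm (PySem.Set.ofList kl) (fun x : Char => x) false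
  exact h.nodup_iff.mpr (PySem.Set.nodup_ofList _)

lemma mem_dOf (kl : List Char) (ch : Char) : ch ∈ dOf kl ↔ ch ∈ kl := by
  rw [dOf, PySem.List.mem_sorted, PySem.Set.mem_ofList]

lemma dOf_ne_nil (kl : List Char) (h : kl ≠ []) : dOf kl ≠ [] := by
  obtain ⟨x, xs, rfl⟩ := List.exists_cons_of_ne_nil h
  intro hd
  have : x ∈ dOf (x :: xs) := (mem_dOf _ _).mpr (by simp)
  rw [hd] at this
  simp at this

-- ---- A: max(col_order) + 1 is the number of distinct key characters ----

lemma max_col_order (kl : List Char) (h : kl ≠ []) :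
    PySem.List.max? (kl.map (fun ch => ((dOf kl).idxOf ch : Int))) (fun x => x)
      = some ((dOf kl).length - 1 : Int) := by
  set f : Char → Int := fun ch => ((dOf kl).idxOf ch : Int) with hf
  have hne : kl.map f ≠ [] := by simpa using h
  obtain ⟨m, hm⟩ := Option.isSome_iff_exists.mp (max?_isSome (kl.map f) (fun x => x) hne)
  rw [hm]
  congr 1
  have hmem := PySem.List.max?_mem hm
  have hmax := PySem.List.max?_isMax hm
  have hub : ∀ v ∈ kl.map f, v ≤ ((dOf kl).length : Int) - 1 := by
    intro v hv
    obtain ⟨ch, hch, rfl⟩ := List.mem_map.mp hv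
    have : (dOf kl).idxOf ch < (dOf kl).length :=
      List.idxOf_lt_length_of_mem ((mem_dOf kl ch).mpr hch)
    simp only [hf]
    omega
  have hD := dOf_ne_nil kl h
  have hlpos : 0 < (dOf kl).length := List.length_pos_iff.mpr hD
  have hlast : ((dOf kl).length - 1 : Nat) < (dOf kl).length := by omega
  have hchmem : (dOf kl)[(dOf kl).length - 1] ∈ kl :=
    (mem_dOf kl _).mp (List.getElem_mem hlast)
  have hidx : (dOf kl).idxOf (dOf kl)[(dOf kl).length - 1] = (dOf kl).length - 1 :=
    List.Nodup.idxOf_getElem (dOf_nodup kl) _ hlast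
  have hattained : (((dOf kl).length : Int) - 1) ∈ kl.map f := by
    rw [List.mem_map]
    refine ⟨_, hchmem, ?_⟩
    rw [hf]
    simp only [hidx]
    omega
  have h1 : m ≤ ((dOf kl).length : Int) - 1 := hub m hmem
  have h2 : ((dOf kl).length : Int) - 1 ≤ m := hmax _ hattained
  omega

-- ---- the stable sort as grouping: insertBy into key-homogeneous blocks ----

lemma insertBy_append_of_not_before {α : Type} (before : α → α → Bool) (x : α)
    (l1 l2 : List α) (h : ∀ a ∈ l1, before x a = false) :
    PySem.List.insertBy before x (l1 ++ l2) = l1 ++ PySem.List.insertBy before x l2 := by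
  induction l1 with
  | nil => rfl
  | cons a l1 ih =>
    rw [List.cons_append, PySem.List.insertBy.eq_def]
    simp only [h a (by simp), Bool.false_eq_true, if_false]
    rw [ih (fun b hb => h b (by simp [hb])), List.cons_append]

lemma insertBy_of_forall_before {α : Type} (before : α → α → Bool) (x : α)
    (l : List α) (h : ∀ a ∈ l, before x a = true) :
    PySem.List.insertBy before x l = x :: l := by
  cases l with
  | nil => rfl
  | cons a l => rw [PySem.List.insertBy.eq_def]; simp [h a (by simp)]

lemma insertBy_flatMap_blocks {α : Type} (key : α → Char) (x : α) (D : List Char)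
    (g : Char → List α) (hD : D.Pairwise (fun a b => a < b))
    (hg : ∀ v ∈ D, ∀ a ∈ g v, key a = v) (hx : key x ∈ D) :
    PySem.List.insertBy (fun a b => decide (key a < key b)) x (D.flatMap g)
      = D.flatMap (fun v => g v ++ if key x = v then [x] else []) := by
  induction D with
  | nil => simp at hx
  | cons v D ih =>
    obtain ⟨hvlt, hDp⟩ := List.pairwise_cons.mp hD
    rw [List.flatMap_cons, List.flatMap_cons]
    have hgv : ∀ a ∈ g v, key a = v := hg v (by simp)
    by_cases hxv : key x = v
    · -- x belongs after the block of v; every later block has a strictly larger key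
      rw [insertBy_append_of_not_before _ _ _ _
        (fun a ha => by simp [hgv a ha, hxv])]
      rw [insertBy_of_forall_before _ _ _
        (fun a ha => by
          obtain ⟨v', hv', ha'⟩ := List.mem_flatMap.mp ha
          have : key a = v' := hg v' (by simp [hv']) a ha'
          simp [this, hxv, hvlt v' hv'])]
      have hrest : D.flatMap (fun v' => g v' ++ if key x = v' then [x] else [])
          = D.flatMap g := by
        apply List.flatMap_congr
        intro v' hv'
        have : key x ≠ v' := by
          rw [hxv]; exact ne_of_lt (hvlt v' hv')
        simp [this]
      rw [hrest, if_pos hxv]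
      simp
    · have hxD : key x ∈ D := by
        rcases List.mem_cons.mp hx with h | h
        · exact absurd h hxv
        · exact h
      have hvx : v < key x := hvlt _ hxD
      rw [insertBy_append_of_not_before _ _ _ _
        (fun a ha => by simp [hgv a ha]; exact hvx.le)]
      rw [ih hDp (fun v' hv' => hg v' (by simp [hv'])) hxD, if_neg hxv]
      simp

-- a stable sort is: the blocks of equal-key elements, in increasing key order
lemma sorted_eq_flatMap_filter {α : Type} (xs : List α) (key : α → Char) (D : List Char)
    (hD : D.Pairwise (fun a b => a < b)) (hmem : ∀ x ∈ xs, key x ∈ D) :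
    PySem.List.sorted xs key = D.flatMap (fun v => xs.filter (fun x => key x == v)) := by
  induction xs using List.reverseRecOn with
  | nil => simp [PySem.List.sorted_eq_foldl_insertBy]
  | append_singleton xs x ih =>
    have hsortapp : PySem.List.sorted (xs ++ [x]) key
        = PySem.List.insertBy (fun a b => decide (key a < key b)) x (PySem.List.sorted xs key) := by
      rw [PySem.List.sorted_eq_foldl_insertBy, PySem.List.sorted_eq_foldl_insertBy,
        List.foldl_append, List.foldl_cons, List.foldl_nil]
    rw [hsortapp, ih (fun y hy => hmem y (by simp [hy]))]
    rw [insertBy_flatMap_blocks key x D _ hD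
      (fun v _ a ha => by simpa using (List.mem_filter.mp ha).2)
      (hmem x (by simp))]
    apply List.flatMap_congr
    intro v _
    rw [List.filter_append]
    congr 1
    by_cases h : key x = v <;> simp [h]

-- ---- index bookkeeping ----

lemma enum_filter_map_aux (kl : List Char) (ch : Char) (s : Int) :
    ((PySem.List.enumerate kl s).filter (fun p => p.2 == ch)).map (fun p => p.1)
      = ((List.range kl.length).filter (fun c => kl[c]?.getD 'X' == ch)).map
          (fun (c : Nat) => s + (c : Int)) := by
  induction kl generalizing s with
  | nil => simp [PySem.List.enumerate_nil]
  | cons x kl ih =>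
    have hcomp : ((fun c : Nat => (x :: kl)[c]?.getD 'X' == ch) ∘ Nat.succ)
        = fun c : Nat => kl[c]?.getD 'X' == ch := by
      funext c; simp
    have hmaps : ∀ (l : List Nat),
        (l.map Nat.succ).map (fun (c : Nat) => s + (c : Int))
          = l.map (fun (c : Nat) => (s + 1) + (c : Int)) := by
      intro l; rw [List.map_map]; apply List.map_congr_left; intro c _
      simp only [Function.comp_apply, Nat.succ_eq_add_one]; push_cast; ring
    rw [PySem.List.enumerate_cons, List.length_cons, List.range_succ_eq_map,
      List.filter_cons, List.filter_cons, List.filter_map, hcomp]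
    simp only [List.getElem?_cons_zero, Option.getD_some]
    by_cases h : x == ch
    · rw [if_pos h, if_pos (by simpa using h)]
      rw [List.map_cons, List.map_cons, hmaps, ih (s + 1)]
      simp
    · rw [if_neg h, if_neg (by simpa using h)]
      rw [hmaps, ih (s + 1)]

lemma range_mul_flatMap (rows k : Nat) :
    List.range (rows * k)
      = (List.range rows).flatMap (fun r => (List.range k).map (fun c => r * k + c)) := by
  induction rows with
  | zero => simp
  | succ rows ih =>
    rw [Nat.succ_mul, List.range_add, ih, List.range_succ, List.flatMap_append]
    simp

lemma flatMap_range_getD {α β : Type} (l : List α) (d : α) (g : α → List β) :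
    (List.range l.length).flatMap (fun i => g (l.getD i d)) = l.flatMap g := by
  induction l with
  | nil => simp
  | cons x l ih =>
    rw [List.length_cons, List.range_succ_eq_map, List.flatMap_cons, List.flatMap_map]
    simp only [List.getD_cons_zero, List.getD_cons_succ]
    rw [List.flatMap_cons, ih]

lemma enumerate_map {α β : Type} (f : α → β) (xs : List α) (s : Int) :
    PySem.List.enumerate (xs.map f) s = (PySem.List.enumerate xs s).map (fun p => (p.1, f p.2)) := by
  induction xs generalizing s with
  | nil => simp [PySem.List.enumerate_nil]
  | cons x xs ih => simp [PySem.List.enumerate_cons, ih]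

-- A's per-rank column list in terms of the key characters
lemma cols_eq (kl : List Char) (i : Nat) (hi : i < (dOf kl).length) :
    ((PySem.List.enumerate (kl.map (fun ch => ((dOf kl).idxOf ch : Int)))).filter
        (fun p => p.2 == (i : Int))).map (fun p => p.1)
    = ((PySem.List.enumerate kl).filter (fun p => p.2 == (dOf kl)[i])).map (fun p => p.1) := by
  rw [enumerate_map, List.filter_map]
  have hcong : ∀ p ∈ PySem.List.enumerate kl,
      ((fun p : Int × Int => p.2 == (i : Int)) ∘ (fun p : Int × Char => (p.1, (dOf kl).idxOf p.2)))
        p = (p.2 == (dOf kl)[i]) := by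
    intro p hp
    have hpm : p.2 ∈ kl := by
      obtain ⟨k, hk, rfl⟩ := (PySem.List.mem_enumerate_iff kl 0 p).mp hp
      simp
    have hpd : p.2 ∈ dOf kl := (mem_dOf kl _).mpr hpm
    simp only [Function.comp_apply]
    by_cases he : p.2 = (dOf kl)[i]
    · rw [he, List.Nodup.idxOf_getElem (dOf_nodup kl) i hi]
      simp [he]
    · have hne : (dOf kl).idxOf p.2 ≠ i := by
        intro hx
        apply he
        have hlt : (dOf kl).idxOf p.2 < (dOf kl).length := List.idxOf_lt_length_of_mem hpd
        have hgi := List.getElem_idxOf hlt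
        have : (dOf kl)[i]'hi = p.2 := by
          rw [← hgi]
          congr 1
          exact hx.symm
        exact this.symm
      simp [he, hne]
  rw [List.filter_congr hcong, List.map_map]
  rfl

-- grid[r][c] = tl[r*n+c]
lemma val_eq (tl : List Char) (n rows : Nat) (r : Nat) (hr : r < rows) (k : Nat) (hk : k < n) :
    (PySem.List.pyGet? (((List.range rows).map
        (fun r : Nat => PySem.List.slice tl (some ((r : Int) * n)) (some (((r : Int) + 1) * n)))).getD r [])
      (k : Int)).getD 'X'
    = (PySem.List.pyGet? tl ((r : Int) * n + (k : Int))).getD 'X' := by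
  rw [PySem.List.getD_map_range _ _ _ _ hr]
  have h1 : ((r : Int) * n) = ((r * n : Nat) : Int) := by push_cast; ring
  have h2 : (((r : Int) + 1) * n) = (((r + 1) * n : Nat) : Int) := by push_cast; ring
  rw [h1, h2, PySem.List.slice_natCast, ← Nat.cast_add]
  have h4 : ∀ (xs : List Char) (m : Nat), PySem.List.pyGet? xs (m : Int) = xs[m]? := by
    intro xs m; simp [pysem]
  rw [h4, h4, List.getElem?_take, List.getElem?_drop]
  have hn' : (r + 1) * n - r * n = n := by rw [Nat.succ_mul]; omega
  rw [hn', if_pos hk]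

-- the padded length is a multiple of the key length
lemma padded_dvd (len k : Nat) (hk : 0 < k) :
    k ∣ (if len % k ≠ 0 then len + (k - len % k) else len) := by
  by_cases h : len % k = 0
  · simp [h]
    exact Nat.dvd_of_mod_eq_zero h
  · rw [if_pos h]
    have h1 : len % k < k := Nat.mod_lt _ hk
    have h2 : len + (k - len % k) = k * (len / k) + k := by
      have := Nat.div_add_mod len k
      omega
    rw [h2]
    exact Dvd.dvd.add (Dvd.intro _ rfl) dvd_rfl


-- the heart of the equivalence: A's rank-grouped grid read-out is B's stable position sort
lemma core_eq (kl tl : List Char) (hk : 0 < kl.length) (hdvd : kl.length ∣ tl.length) :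
    (List.range (dOf kl).length).flatMap (fun (a : Nat) =>
      (List.range (tl.length / kl.length)).flatMap (fun (r : Nat) =>
        (((PySem.List.enumerate (kl.map (fun ch => ((dOf kl).idxOf ch : Int)))).filter
            (fun p => p.2 == (a : Int))).map (fun p => p.1)).map
          (fun c => (PySem.List.pyGet? (((List.range (tl.length / kl.length)).map
              (fun r : Nat => PySem.List.slice tl (some ((r : Int) * kl.length))
                (some (((r : Int) + 1) * kl.length)))).getD r []) c).getD 'X')))
    = (PySem.List.sorted (PySem.List.pyRange 0 (tl.length : Int))
        (fun i => (PySem.List.pyGet? kl (PySem.Int.mod i (kl.length : Int))).getD 'X')).map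
        (fun i => (PySem.List.pyGet? tl i).getD 'X') := by
  have hDlt : (dOf kl).Pairwise (fun a b => a < b) :=
    PySem.List.sorted_ofList_pairwise_lt kl
  have hrows : tl.length / kl.length * kl.length = tl.length := Nat.div_mul_cancel hdvd
  -- B: the sorted position list is the concatenation of the key-letter blocks of positions
  rw [PySem.List.pyRange_zero_natCast]
  rw [sorted_eq_flatMap_filter _ _ (dOf kl) hDlt (by
    intro x hx
    obtain ⟨m, _, rfl⟩ := List.mem_map.mp hx
    have hm : m % kl.length < kl.length := Nat.mod_lt _ hk
    simp only [PySem.Int.mod_natCast, PySem.List.pyGet?_natCast,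
      List.getElem?_eq_getElem hm, Option.getD_some]
    exact (mem_dOf kl _).mpr (List.getElem_mem hm))]
  rw [List.map_flatMap, ← flatMap_range_getD (dOf kl) 'X']
  apply List.flatMap_congr
  intro i hiR
  have hi : i < (dOf kl).length := List.mem_range.mp hiR
  rw [List.getD_eq_getElem _ _ hi]
  -- A: the rank-i columns are the columns whose key letter is (dOf kl)[i]
  rw [cols_eq kl i hi, enum_filter_map_aux kl ((dOf kl)[i]) 0]
  simp only [List.filter_map, List.map_map, Function.comp_def,
    PySem.Int.mod_natCast, PySem.List.pyGet?_natCast, zero_add]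
  -- B: decompose the positions into rows and columns
  rw [show List.range tl.length = List.range (tl.length / kl.length * kl.length) by
      rw [hrows],
    range_mul_flatMap, List.filter_flatMap, List.map_flatMap]
  apply List.flatMap_congr
  intro r hrR
  have hr : r < tl.length / kl.length := List.mem_range.mp hrR
  simp only [List.filter_map, List.map_map, Function.comp_def,
    PySem.Int.mod_natCast, PySem.List.pyGet?_natCast]
  have hpred : (List.range kl.length).filter
        (fun c => kl[(r * kl.length + c) % kl.length]?.getD 'X' == (dOf kl)[i])
      = (List.range kl.length).filter (fun c => kl[c]?.getD 'X' == (dOf kl)[i]) :=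
    List.filter_congr (fun c hc => by
      have hck : c < kl.length := List.mem_range.mp hc
      rw [Nat.mul_comm, Nat.mul_add_mod, Nat.mod_eq_of_lt hck])
  rw [hpred]
  apply List.map_congr_left
  intro c hcF
  have hck : c < kl.length := List.mem_range.mp (List.mem_of_mem_filter hcF)
  have hcast : (r : Int) * (kl.length : Int) + (c : Int) = ((r * kl.length + c : Nat) : Int) := by
    push_cast; ring
  have hval := val_eq tl kl.length (tl.length / kl.length) r hr c hck
  simp only [hcast, PySem.List.pyGet?_natCast] at hval
  exact hval

-- ===== VERDICT (by name: the statement is the Claim_ definition above) =====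
theorem myszkowski_encrypt_spec : Claim_equal_myszkowski_encrypt := by
  intro text key _hdom hpre
  unfold Spec_myszkowski_encrypt
  have hk : key.toList ≠ [] := fun h => hpre (String.toList_eq_nil_iff.mp h)
  have hkpos : 0 < key.toList.length := List.length_pos_iff.mpr hk
  simp only [myszkowski_encrypt, myszkowski_encrypt_alt]
  apply congrArg String.mk
  simp only [PySem.List.foldl_append_singleton_eq_map, PySem.List.foldl_append_eq_flatMap,
    List.nil_append]
  rw [get_column_order_eq, max_col_order _ hk]
  simp only [Option.getD_some]
  have hL : ((dOf key.toList).length : Int) - 1 + 1 = ((dOf key.toList).length : Int) := by ring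
  rw [hL, PySem.List.pyRange_zero_natCast, List.flatMap_map]
  have hdvd : key.toList.length ∣
      (if text.toList.length % key.toList.length ≠ 0 then
        text.toList ++ List.replicate (key.toList.length - text.toList.length % key.toList.length) 'X'
      else text.toList).length := by
    have htl : (if text.toList.length % key.toList.length ≠ 0 then
          text.toList ++ List.replicate (key.toList.length - text.toList.length % key.toList.length) 'X'
        else text.toList).length
        = if text.toList.length % key.toList.length ≠ 0 then
            text.toList.length + (key.toList.length - text.toList.length % key.toList.length)
          else text.toList.length := by
      split <;> simp
    rw [htl]
    exact padded_dvd _ _ hkpos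
  exact core_eq key.toList _ hkpos hdvd
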